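-- pv_equiv track=rewrite | github.com/nithinyanna10/re-diligence-embeddings | scripts/generate_dataset.py | extract_primary_topic
-- ===== SOURCE A (Python) =====
-- from typing import Dict, List, Any
--
-- def extract_primary_topic(tags: List[str]) -> str:
--     """Extract primary topic from tags for hard negative mining."""
--     if not tags:
--         return "general"
--
--     # Priority order for topic extraction
--     topic_priority = [
--         "lease", "CAM", "rent_roll", "T12", "NOI", "capex", "title", "ALTA",
--         "PhaseI", "RECs", "zoning", "permits", "insurance", "debt_terms",
--         "DSCR", "debt_yield", "TI_LC", "estoppel", "SNDA", "WALE", "GPR",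
--         "vacancy_loss", "credit_loss", "concessions", "rollover", "PCA",
--         "deferred_maintenance", "environmental", "survey", "easements",
--         "zoning_compliance", "insurance_coverage", "debt_covenants"
--     ]
--
--     # Find first matching tag in priority order
--     for priority_tag in topic_priority:
--         for tag in tags:
--             if priority_tag.lower() in tag.lower() or tag.lower() in priority_tag.lower():
--                 return priority_tag
--
--     # Fallback to first tag
--     return tags[0].lower() if tags else "general"
-- ===== SOURCE B (Python) =====
-- def extract_primary_topic(tags):
--     """Extract primary topic from tags for hard negative mining."""
--     if not tags:
--         return "general"
--
--     topic_priority = [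
--         "lease", "CAM", "rent_roll", "T12", "NOI", "capex", "title", "ALTA",
--         "PhaseI", "RECs", "zoning", "permits", "insurance", "debt_terms",
--         "DSCR", "debt_yield", "TI_LC", "estoppel", "SNDA", "WALE", "GPR",
--         "vacancy_loss", "credit_loss", "concessions", "rollover", "PCA",
--         "deferred_maintenance", "environmental", "survey", "easements",
--         "zoning_compliance", "insurance_coverage", "debt_covenants"
--     ]
--
--     # One pass over the tags, keeping the best (smallest) priority index seen.
--     best = None
--     for tag in tags:
--         t = tag.lower()
--         for i, p in enumerate(topic_priority):
--             pl = p.lower()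
--             if pl in t or t in pl:
--                 if best is None or i < best:
--                     best = i
--                 break
--
--     return topic_priority[best] if best is not None else tags[0].lower()
-- ===== Notes on version B (the rewrite author's own statement) =====
-- stated objective: alternative
-- what changed: B traverses the tags once (outer) and maintains a running minimum priority index, breaking out of the priority scan at each tag's first match, instead of A's priority-outer nested loop that early-returns on the first priority entry matched by any tag.
import Mathlib
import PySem

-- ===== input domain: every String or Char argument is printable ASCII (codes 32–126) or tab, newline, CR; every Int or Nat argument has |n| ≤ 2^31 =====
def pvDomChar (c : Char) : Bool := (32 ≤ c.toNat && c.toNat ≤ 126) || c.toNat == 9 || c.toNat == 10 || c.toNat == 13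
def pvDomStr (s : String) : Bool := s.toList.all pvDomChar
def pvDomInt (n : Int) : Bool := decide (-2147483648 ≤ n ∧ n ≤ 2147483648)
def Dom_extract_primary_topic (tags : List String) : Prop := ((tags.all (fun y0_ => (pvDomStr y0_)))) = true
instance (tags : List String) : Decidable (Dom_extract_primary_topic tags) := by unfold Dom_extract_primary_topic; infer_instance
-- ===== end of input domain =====

-- B replaces A's priority-outer nested loop (early return on first matched priority entry)
-- by a single tag-outer pass that keeps a running minimum priority index (objective: alternative).

-- the constant priority list, shared verbatim by both Pythons
def epTopicPriority : List String :=
  ["lease", "CAM", "rent_roll", "T12", "NOI", "capex", "title", "ALTA",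
   "PhaseI", "RECs", "zoning", "permits", "insurance", "debt_terms",
   "DSCR", "debt_yield", "TI_LC", "estoppel", "SNDA", "WALE", "GPR",
   "vacancy_loss", "credit_loss", "concessions", "rollover", "PCA",
   "deferred_maintenance", "environmental", "survey", "easements",
   "zoning_compliance", "insurance_coverage", "debt_covenants"]

-- 'priority_tag.lower() in tag.lower() or tag.lower() in priority_tag.lower()' (identical test in both Pythons)
def epMatch (p t : String) : Bool :=
  PySem.Str.isIn (PySem.Str.lower p) (PySem.Str.lower t)
    || PySem.Str.isIn (PySem.Str.lower t) (PySem.Str.lower p)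

-- ===== PORT A =====
-- A's nested loop: priority entries outer, tags inner, return first priority entry matched by any tag
def epA_find (tags : List String) : List String → Option String
  | [] => none
  | p :: rest => if tags.any (fun t => epMatch p t) then some p else epA_find tags rest

def extract_primary_topic (tags : List String) : String :=
  if tags.isEmpty then "general"
  else
    match epA_find tags epTopicPriority with
    | some p => p
    | none =>
      -- 'tags[0].lower() if tags else "general"'
      match tags.head? with
      | some t0 => PySem.Str.lower t0
      | none => "general"

-- ===== PORT B =====
-- inner 'for i, p in enumerate(topic_priority): … break' — first priority index matching this tag
def epB_firstIdx (t : String) (i : Nat) : List String → Option Nat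
  | [] => none
  | p :: rest => if epMatch p t then some i else epB_firstIdx t (i + 1) rest

-- 'if best is None or i < best: best = i' after a per-tag inner scan
def epB_step (acc : Option Nat) (t : String) : Option Nat :=
  match epB_firstIdx t 0 epTopicPriority with
  | none => acc
  | some i =>
    match acc with
    | none => some i
    | some b => if i < b then some i else acc

def extract_primary_topic_alt (tags : List String) : String :=
  if tags.isEmpty then "general"
  else
    match tags.foldl epB_step none with
    | some i => epTopicPriority.getD i ""   -- topic_priority[best]; i is always in range, default never used
    | none =>
      match tags.head? with
      | some t0 => PySem.Str.lower t0
      | none => "general"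

-- ===== PRECONDITION & SPEC =====
def Spec_extract_primary_topic (tags : List String) (out : String) : Prop := out = extract_primary_topic_alt tags
instance (tags : List String) (out : String) : Decidable (Spec_extract_primary_topic tags out) := by unfold Spec_extract_primary_topic; infer_instance

-- ===== CLAIM (what is proved, stated in full; the proofs are below) =====
def Claim_equal_extract_primary_topic : Prop := ∀ (tags : List String), Dom_extract_primary_topic tags → Spec_extract_primary_topic tags (extract_primary_topic tags)

-- ===== LEMMAS AND PROOFS =====

-- first index (into ps) of a priority entry matched by ANY of the tags
def epJ (tags : List String) : List String → Option Nat
  | [] => none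
  | p :: rest => if tags.any (fun t => epMatch p t) then some 0 else (epJ tags rest).map (· + 1)

-- first index (into ps) of a priority entry matching ONE tag
def epF (t : String) : List String → Option Nat
  | [] => none
  | p :: rest => if epMatch p t then some 0 else (epF t rest).map (· + 1)

def epOmin : Option Nat → Option Nat → Option Nat
  | none, b => b
  | a, none => a
  | some a, some b => some (min a b)

theorem epB_firstIdx_eq (t : String) (ps : List String) :
    ∀ i, epB_firstIdx t i ps = (epF t ps).map (· + i) := by
  induction ps with
  | nil => intro i; rfl
  | cons p rest ih =>
    intro i
    simp only [epB_firstIdx, epF]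
    split
    · simp
    · rw [ih (i + 1)]
      cases epF t rest <;> simp <;> omega

theorem epOmin_none_right (a : Option Nat) : epOmin a none = a := by cases a <;> rfl

theorem epOmin_map_succ (a b : Option Nat) :
    epOmin (a.map (· + 1)) (b.map (· + 1)) = (epOmin a b).map (· + 1) := by
  cases a <;> cases b <;> simp [epOmin, Nat.min_def] <;> split <;> omega

theorem epOmin_assoc (a b c : Option Nat) :
    epOmin (epOmin a b) c = epOmin a (epOmin b c) := by
  cases a <;> cases b <;> cases c <;> simp [epOmin, Nat.min_assoc]

theorem epOmin_zero_left (b : Option Nat) : epOmin (some 0) b = some 0 := by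
  cases b <;> simp [epOmin]

theorem epOmin_zero_right (a : Option Nat) : epOmin a (some 0) = some 0 := by
  cases a <;> simp [epOmin]

theorem epJ_nil (ps : List String) : epJ [] ps = none := by
  induction ps with
  | nil => rfl
  | cons p rest ih => simp [epJ, ih]

-- the first index matched by (t :: ts) is the min of t's first index and ts' first index
theorem epJ_cons (t : String) (ts : List String) (ps : List String) :
    epJ (t :: ts) ps = epOmin (epF t ps) (epJ ts ps) := by
  induction ps with
  | nil => rfl
  | cons p rest ih =>
    by_cases hm : epMatch p t
    · have h1 : (t :: ts).any (fun x => epMatch p x) = true := by simp [hm]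
      simp only [epJ, epF, h1, hm, if_true]
      rw [epOmin_zero_left]
    · by_cases ha : ts.any (fun x => epMatch p x)
      · have h1 : (t :: ts).any (fun x => epMatch p x) = true := by
          simp only [List.any_cons]; simp [ha]
        simp only [epJ, epF, h1, hm, if_true, Bool.false_eq_true, if_false, ha]
        rw [epOmin_zero_right]
      · have h1 : (t :: ts).any (fun x => epMatch p x) = false := by simp [hm, ha]
        simp only [epJ, epF, h1, hm, ha, Bool.false_eq_true, if_false]
        rw [ih, epOmin_map_succ]

theorem epB_step_eq (acc : Option Nat) (t : String) :
    epB_step acc t = epOmin acc (epF t epTopicPriority) := by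
  simp only [epB_step, epB_firstIdx_eq]
  cases h : epF t epTopicPriority with
  | none => simp [epOmin_none_right]
  | some i =>
    cases acc with
    | none => simp [epOmin]
    | some b =>
      simp only [Option.map_some, epOmin, Nat.min_def]
      split_ifs <;> simp <;> omega

theorem epFold_eq (tags : List String) :
    ∀ acc, tags.foldl epB_step acc = epOmin acc (epJ tags epTopicPriority) := by
  induction tags with
  | nil => intro acc; rw [List.foldl_nil, epJ_nil, epOmin_none_right]
  | cons t ts ih =>
    intro acc
    simp only [List.foldl_cons, ih, epB_step_eq, epJ_cons, epOmin_assoc]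

theorem epA_find_eq (tags ps : List String) :
    epA_find tags ps = (epJ tags ps).map (fun i => ps.getD i "") := by
  induction ps with
  | nil => rfl
  | cons p rest ih =>
    simp only [epA_find, epJ]
    split
    · rfl
    · rw [ih]
      cases epJ tags rest <;> simp

-- ===== VERDICT (by name: the statement is the Claim_ definition above) =====
theorem extract_primary_topic_spec : Claim_equal_extract_primary_topic := by
  intro tags _
  unfold Spec_extract_primary_topic extract_primary_topic extract_primary_topic_alt
  by_cases h : tags.isEmpty
  · simp [h]
  · simp only [h, Bool.false_eq_true, if_false]
    rw [epFold_eq, epA_find_eq]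
    cases epJ tags epTopicPriority <;> simp [epOmin]
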